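-- pv_equiv track=rewrite | github.com/ChanSuvannet/crypto-signal-system | backend/bots/news-collector-bot/src/sources/twitter_scraper.py | _extract_currencies_from_text
-- ===== SOURCE A (Python) =====
-- from typing import Dict, List, Optional
--
-- def _extract_currencies_from_text(text: str) -> List[str]:
--     """Extract cryptocurrency codes from text"""
--     currencies = []
--     text_upper = text.upper()
--
--     # Common crypto patterns
--     crypto_map = {
--         "$BTC": "BTC",
--         "BITCOIN": "BTC",
--         "$ETH": "ETH",
--         "ETHEREUM": "ETH",
--         "$BNB": "BNB",
--         "$SOL": "SOL",
--         "SOLANA": "SOL",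
--         "$XRP": "XRP",
--         "$ADA": "ADA",
--         "CARDANO": "ADA",
--         "$DOGE": "DOGE",
--         "DOGECOIN": "DOGE",
--         "$MATIC": "MATIC",
--         "POLYGON": "MATIC",
--         "$DOT": "DOT",
--         "POLKADOT": "DOT",
--         "$AVAX": "AVAX",
--         "AVALANCHE": "AVAX",
--     }
--
--     for pattern, code in crypto_map.items():
--         if pattern in text_upper:
--             if code not in currencies:
--                 currencies.append(code)
--
--     return currencies
-- ===== SOURCE B (Python) =====
-- from typing import Dict, List, Optional
--
-- def _extract_currencies_from_text(text: str) -> List[str]: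
--     """Extract cryptocurrency codes from text"""
--     text_upper = text.upper()
--
--     # One entry per currency code (first-appearance order of the original
--     # pattern table), each with every pattern that maps to it.
--     crypto_patterns = {
--         "BTC": ["$BTC", "BITCOIN"],
--         "ETH": ["$ETH", "ETHEREUM"],
--         "BNB": ["$BNB"],
--         "SOL": ["$SOL", "SOLANA"],
--         "XRP": ["$XRP"],
--         "ADA": ["$ADA", "CARDANO"],
--         "DOGE": ["$DOGE", "DOGECOIN"],
--         "MATIC": ["$MATIC", "POLYGON"],
--         "DOT": ["$DOT", "POLKADOT"],
--         "AVAX": ["$AVAX", "AVALANCHE"],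
--     }
--
--     return [code for code, patterns in crypto_patterns.items()
--             if any(p in text_upper for p in patterns)]
-- ===== Notes on version B (the rewrite author's own statement) =====
-- stated objective: simpler
-- what changed: B replaces A's per-pattern loop with its append-and-membership dedup guard by a code-keyed table (each code listed once with all its patterns) and a single comprehension emitting a code iff any() of its patterns occurs, so no dedup is needed.
import Mathlib
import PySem

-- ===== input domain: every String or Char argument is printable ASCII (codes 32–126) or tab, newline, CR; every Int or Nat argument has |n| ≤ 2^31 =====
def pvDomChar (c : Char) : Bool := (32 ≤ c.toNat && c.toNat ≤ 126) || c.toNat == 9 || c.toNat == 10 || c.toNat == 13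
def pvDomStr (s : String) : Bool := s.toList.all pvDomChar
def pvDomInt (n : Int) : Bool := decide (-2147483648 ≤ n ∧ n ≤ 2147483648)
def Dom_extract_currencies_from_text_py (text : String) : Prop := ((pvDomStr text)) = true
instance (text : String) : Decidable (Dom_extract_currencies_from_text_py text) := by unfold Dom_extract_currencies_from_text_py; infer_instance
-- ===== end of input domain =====

-- B keys the table by currency code (each code once, with all its patterns) and emits a code
-- iff any() of its patterns occurs, removing A's per-pattern dedup loop; simpler, same cost.

-- ===== PORT A =====
-- A's crypto_map dict literal (distinct keys, so .items() is just the pair list in order)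
def pvCryptoMap : List (String × String) :=
  [("$BTC", "BTC"), ("BITCOIN", "BTC"), ("$ETH", "ETH"), ("ETHEREUM", "ETH"),
   ("$BNB", "BNB"), ("$SOL", "SOL"), ("SOLANA", "SOL"), ("$XRP", "XRP"),
   ("$ADA", "ADA"), ("CARDANO", "ADA"), ("$DOGE", "DOGE"), ("DOGECOIN", "DOGE"),
   ("$MATIC", "MATIC"), ("POLYGON", "MATIC"), ("$DOT", "DOT"), ("POLKADOT", "DOT"),
   ("$AVAX", "AVAX"), ("AVALANCHE", "AVAX")]

def extract_currencies_from_text_py (text : String) : List String :=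
  let text_upper := PySem.Str.upper text
  pvCryptoMap.foldl
    (fun currencies pc =>
      if PySem.Str.isIn pc.1 text_upper then
        if currencies.contains pc.2 then currencies else currencies ++ [pc.2]
      else currencies)
    []

-- ===== PORT B =====
-- B's crypto_patterns dict literal (distinct keys)
def pvCryptoPatterns : List (String × List String) :=
  [("BTC", ["$BTC", "BITCOIN"]), ("ETH", ["$ETH", "ETHEREUM"]), ("BNB", ["$BNB"]),
   ("SOL", ["$SOL", "SOLANA"]), ("XRP", ["$XRP"]), ("ADA", ["$ADA", "CARDANO"]),
   ("DOGE", ["$DOGE", "DOGECOIN"]), ("MATIC", ["$MATIC", "POLYGON"]),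
   ("DOT", ["$DOT", "POLKADOT"]), ("AVAX", ["$AVAX", "AVALANCHE"])]

def extract_currencies_from_text_py_alt (text : String) : List String :=
  let text_upper := PySem.Str.upper text
  (pvCryptoPatterns.filter
      (fun cp => cp.2.any (fun p => PySem.Str.isIn p text_upper))).map Prod.fst

-- ===== PRECONDITION & SPEC =====
def Spec_extract_currencies_from_text_py (text : String) (out : List String) : Prop := out = extract_currencies_from_text_py_alt text
instance (text : String) (out : List String) : Decidable (Spec_extract_currencies_from_text_py text out) := by unfold Spec_extract_currencies_from_text_py; infer_instance

-- ===== CLAIM (what is proved, stated in full; the proofs are below) =====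
def Claim_equal_extract_currencies_from_text_py : Prop := ∀ (text : String), Dom_extract_currencies_from_text_py text → Spec_extract_currencies_from_text_py text (extract_currencies_from_text_py text)

-- ===== LEMMAS AND PROOFS =====

-- A's loop body, named for the lemmas
def pvStepA (tu : String) (cur : List String) (pc : String × String) : List String :=
  if PySem.Str.isIn pc.1 tu then
    if cur.contains pc.2 then cur else cur ++ [pc.2]
  else cur

lemma pvStepA_stable (tu : String) (c : String) (ps : List String) :
    ∀ cur : List String, cur.contains c = true →
      (ps.map (fun p => (p, c))).foldl (pvStepA tu) cur = cur := by
  induction ps with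
  | nil => intro cur _; rfl
  | cons p ps ih =>
      intro cur h
      simp only [List.map_cons, List.foldl_cons, pvStepA, h]
      split <;> exact ih cur h

lemma pvBlockA (tu : String) (c : String) (ps : List String) :
    ∀ cur : List String, cur.contains c = false →
      (ps.map (fun p => (p, c))).foldl (pvStepA tu) cur =
        if ps.any (fun p => PySem.Str.isIn p tu) then cur ++ [c] else cur := by
  induction ps with
  | nil => intro cur _; rfl
  | cons p ps ih =>
      intro cur h
      simp only [List.map_cons, List.foldl_cons, pvStepA, h, List.any_cons]
      by_cases hp : PySem.Str.isIn p tu = true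
      · simp only [hp, if_true, Bool.true_or]
        exact pvStepA_stable tu c ps (cur ++ [c]) (by simp)
      · simp only [hp, Bool.false_eq_true, if_false, Bool.false_or]
        exact ih cur h

lemma pvMainA (tu : String) :
    ∀ (blocks : List (String × List String)) (cur : List String),
      (∀ c ∈ blocks.map Prod.fst, cur.contains c = false) →
      (blocks.map Prod.fst).Nodup →
      (blocks.flatMap (fun b => b.2.map (fun p => (p, b.1)))).foldl (pvStepA tu) cur =
        cur ++ (blocks.filter (fun b => b.2.any (fun p => PySem.Str.isIn p tu))).map Prod.fst := by
  intro blocks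
  induction blocks with
  | nil => intro cur _ _; simp
  | cons b bs ih =>
      intro cur hfresh hnd
      simp only [List.flatMap_cons, List.foldl_append]
      rw [pvBlockA tu b.1 b.2 cur (hfresh b.1 (by simp))]
      simp only [List.map_cons, List.nodup_cons] at hnd
      by_cases hb : b.2.any (fun p => PySem.Str.isIn p tu) = true
      · rw [if_pos hb, ih (cur ++ [b.1])
          (by
            intro c hc
            have hne : c ≠ b.1 := fun he => hnd.1 (he ▸ hc)
            have h2 := hfresh c (by simp [List.mem_map] at hc ⊢; right; exact hc)
            simp only [List.contains_eq_mem, decide_eq_false_iff_not, List.mem_append,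
              List.mem_singleton] at h2 ⊢
            exact fun h => h.elim h2 hne)
          hnd.2, List.filter_cons]
        simp only [hb, if_true, List.map_cons, List.append_assoc, List.singleton_append]
      · rw [if_neg hb, ih cur
          (by intro c hc; exact hfresh c (by simp [List.mem_map] at hc ⊢; right; exact hc))
          hnd.2, List.filter_cons]
        simp only [hb, Bool.false_eq_true, if_false]

lemma pvCryptoMap_eq_blocks :
    pvCryptoMap = pvCryptoPatterns.flatMap (fun b => b.2.map (fun p => (p, b.1))) := by decide

-- ===== VERDICT (by name: the statement is the Claim_ definition above) =====
theorem extract_currencies_from_text_py_spec : Claim_equal_extract_currencies_from_text_py := by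
  intro text _
  unfold Spec_extract_currencies_from_text_py
  unfold extract_currencies_from_text_py extract_currencies_from_text_py_alt
  show List.foldl (pvStepA (PySem.Str.upper text)) [] pvCryptoMap =
    List.map Prod.fst
      (List.filter (fun cp => cp.2.any fun p => PySem.Str.isIn p (PySem.Str.upper text))
        pvCryptoPatterns)
  rw [pvCryptoMap_eq_blocks,
    pvMainA (PySem.Str.upper text) pvCryptoPatterns [] (by intro c _; rfl) (by decide)]
  simp
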